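-- pv_equiv track=rewrite | github.com/PavelStransky/Bose-Hubbard | development/translation_one_optimised.py | get_orbits
-- ===== SOURCE A (Python) =====
-- def translate_state(state, shift):
--     L = len(state)
--     return tuple(state[(i - shift) % L] for i in range(L))
--
-- def get_orbits(states):
--     seen = set()
--     orbits = []
--     for s in states:
--         if s in seen:
--             continue
--         orbit = {translate_state(s, r) for r in range(len(s))}
--
--         seen.update(orbit)
--         orbits.append(sorted(orbit))
--     return orbits
-- ===== SOURCE B (Python) =====
-- def get_orbits(states):
--     # Two-phase: index states by canonical (minimal) rotation, then emit each orbit.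
--     canon = {}
--     for s in states:
--         rots = [tuple(s[r:] + s[:r]) for r in range(len(s))]
--         c = min(rots) if rots else ()
--         if c not in canon:
--             canon[c] = None
--     orbits = []
--     for c in canon:
--         c = list(c)
--         rots = {tuple(c[r:] + c[:r]) for r in range(len(c))}
--         orbits.append(sorted(rots))
--     return orbits
-- ===== Notes on version B (the rewrite author's own statement) =====
-- stated objective: faster
-- what changed: B is two-phase: it first indexes states by their canonical (lexicographically minimal) rotation in an insertion-ordered dict, then in a second pass regenerates and sorts each orbit from its canonical representative, instead of A's single pass that maintains a seen-set containing every translation of every kept state; B never builds that seen-set, so its per-state work is one min over rotations plus one dict lookup.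
-- intended difference: On inputs containing two or more empty states A returns one empty orbit per empty state (the empty state's orbit-set is empty, so A's seen-set never records it), while B returns the empty orbit once, which is the intended grouping into distinct orbits. — e.g. on get_orbits([[], []]): A returns [[], []], B returns [[]]
import Mathlib
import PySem

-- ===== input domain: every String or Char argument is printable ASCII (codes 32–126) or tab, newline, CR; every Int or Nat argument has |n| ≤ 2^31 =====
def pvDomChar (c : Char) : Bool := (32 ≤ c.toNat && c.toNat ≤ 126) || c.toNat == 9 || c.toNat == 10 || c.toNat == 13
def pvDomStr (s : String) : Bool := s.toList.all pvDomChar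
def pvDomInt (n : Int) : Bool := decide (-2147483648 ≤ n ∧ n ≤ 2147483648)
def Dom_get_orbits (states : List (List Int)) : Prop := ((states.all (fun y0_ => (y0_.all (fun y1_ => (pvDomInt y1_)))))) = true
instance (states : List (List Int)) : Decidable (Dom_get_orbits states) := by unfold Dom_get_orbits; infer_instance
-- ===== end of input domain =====

-- B groups by canonical (minimal) rotation in two passes instead of A's single pass with a
-- seen-set of every translation; on states with two or more empty states A re-emits the empty
-- orbit (its orbit-set is empty, so `seen` never records it) while B emits it once (D_ below).

-- ===== PORT A =====
def translate_state (state : List Int) (shift : Int) : List Int :=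
  let L : Int := state.length
  (PySem.List.pyRange 0 L 1).map
    (fun i => PySem.List.pyGetD state (PySem.Int.mod (i - shift) L) 0)
  -- the default 0 is never used: for L > 0 the index (i - shift) % L is in range, for L = 0 the range is empty

def pvStepA (acc : PySem.Set (List Int) × List (List (List Int))) (s : List Int) :
    PySem.Set (List Int) × List (List (List Int)) :=
  if s ∈ acc.1 then acc
  else
    let orbit : PySem.Set (List Int) :=
      PySem.Set.ofList
        ((PySem.List.pyRange 0 (s.length : Int) 1).map (fun r => translate_state s r))
    (PySem.Set.update acc.1 orbit, acc.2 ++ [PySem.List.sorted orbit (fun x => x) false])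

def get_orbits (states : List (List Int)) : List (List (List Int)) :=
  (states.foldl pvStepA (PySem.Set.empty, [])).2

-- ===== PORT B =====
def pvRots (s : List Int) : List (List Int) :=
  (PySem.List.pyRange 0 (s.length : Int) 1).map
    (fun r => PySem.List.slice s (some r) none ++ PySem.List.slice s none (some r))

def pvCanon (s : List Int) : List Int :=
  let rots := pvRots s
  if rots = [] then [] else (PySem.List.min? rots (fun x => x)).getD []

def pvStepB (d : PySem.Dict (List Int) Unit) (s : List Int) : PySem.Dict (List Int) Unit :=
  if PySem.Dict.contains d (pvCanon s) then d else d.insert (pvCanon s) ()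

def pvGroup (c : List Int) : List (List Int) :=
  PySem.List.sorted (PySem.Set.ofList (pvRots c)) (fun x => x) false

def get_orbits_alt (states : List (List Int)) : List (List (List Int)) :=
  ((states.foldl pvStepB PySem.Dict.empty).keys).map pvGroup

-- ===== PRECONDITION & SPEC =====
-- On states containing two or more empty states A returns one empty orbit PER empty state (the
-- empty orbit-set never marks [] as seen), B returns the empty orbit once — the intended grouping.
def D_get_orbits (states : List (List Int)) : Prop := 2 ≤ states.count ([] : List Int)
instance (states : List (List Int)) : Decidable (D_get_orbits states) := by unfold D_get_orbits; infer_instance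

def Spec_get_orbits (states : List (List Int)) (out : List (List (List Int))) : Prop := ¬ D_get_orbits states → out = get_orbits_alt states
instance (states : List (List Int)) (out : List (List (List Int))) : Decidable (Spec_get_orbits states out) := by unfold Spec_get_orbits; infer_instance

def pvDiffWitness_get_orbits : List (List Int) := [[], []]
def pvDiffWitnessOut_get_orbits : (List (List (List Int))) × (List (List (List Int))) := ([[], []], [[]])

-- ===== CLAIM (what is proved, stated in full; the proofs are below) =====
def Claim_unchanged_get_orbits : Prop := ∀ (states : List (List Int)), Dom_get_orbits states → Spec_get_orbits states (get_orbits states)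
def Claim_changed_get_orbits : Prop := Dom_get_orbits (pvDiffWitness_get_orbits) ∧ D_get_orbits (pvDiffWitness_get_orbits) ∧ get_orbits (pvDiffWitness_get_orbits) = pvDiffWitnessOut_get_orbits.1 ∧ get_orbits_alt (pvDiffWitness_get_orbits) = pvDiffWitnessOut_get_orbits.2 ∧ pvDiffWitnessOut_get_orbits.1 ≠ pvDiffWitnessOut_get_orbits.2
def Claim_exact_get_orbits : Prop := ∀ (states : List (List Int)), Dom_get_orbits states → D_get_orbits states → get_orbits states ≠ get_orbits_alt states

-- ===== LEMMAS AND PROOFS =====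

-- range of ints [0, n) mapped: reduce pyRange to List.range
theorem pv_pyRange_map {α : Type} (n : Nat) (f : Int → α) :
    (PySem.List.pyRange 0 (n : Int) 1).map f = (List.range n).map (fun (k : Nat) => f (k : Int)) := by
  rw [PySem.List.pyRange_one, List.map_map]
  have h1 : ((n : Int) - 0).toNat = n := by omega
  rw [h1]
  exact List.map_congr_left (fun k hk => by simp)

-- B's rotation list is the list of left-rotations of s
theorem pvRots_eq (s : List Int) :
    pvRots s = (List.range s.length).map (fun k => s.rotate k) := by
  unfold pvRots
  rw [pv_pyRange_map]
  refine List.map_congr_left (fun k hk => ?_)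
  rw [List.mem_range] at hk
  rw [PySem.List.slice_from_natCast, PySem.List.slice_to_natCast,
    List.rotate_eq_drop_append_take (le_of_lt hk)]

theorem mem_pvRots {s x : List Int} (hs : s ≠ []) :
    x ∈ pvRots s ↔ s.IsRotated x := by
  rw [pvRots_eq]
  constructor
  · rintro h
    rcases List.mem_map.1 h with ⟨k, _, rfl⟩
    exact ⟨k, rfl⟩
  · rintro ⟨n, rfl⟩
    have hL : 0 < s.length := List.length_pos_iff.2 hs
    refine List.mem_map.2 ⟨n % s.length, List.mem_range.2 (Nat.mod_lt _ hL), ?_⟩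
    exact List.rotate_mod s n

-- the two Decidable instances on (· < ·) for List Int in scope are propositionally equal
theorem pv_dec_inst : (fun (a b : List Int) => a.decidableLT b)
    = (LinearOrder.toDecidableLT (α := List Int)) := by
  funext a b
  exact Subsingleton.elim _ _

theorem pvRots_ne_nil {s : List Int} (hs : s ≠ []) : pvRots s ≠ [] := by
  rw [pvRots_eq]
  have hL : 0 < s.length := List.length_pos_iff.2 hs
  simp [List.map_eq_nil_iff, List.range_eq_nil]
  omega

-- A's translate_state is a rotation
theorem translate_eq_rotate (s : List Int) (k : Nat) (hk : k < s.length) :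
    translate_state s (k : Int) = s.rotate (s.length - k) := by
  have hL : 0 < s.length := by omega
  unfold translate_state
  rw [pv_pyRange_map]
  apply List.ext_getElem
  · simp
  · intro j h1 h2
    simp only [List.getElem_map, List.getElem_range, List.getElem_rotate]
    have hj : j < s.length := by simpa using h1
    have hmod : PySem.Int.mod ((j : Int) - (k : Int)) (s.length : Int)
        = ((j : Int) - (k : Int)) % (s.length : Int) :=
      PySem.Int.mod_eq_emod_of_pos (by exact_mod_cast hL)
    rw [hmod]
    have h0 : (0 : Int) ≤ ((j : Int) - (k : Int)) % (s.length : Int) :=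
      Int.emod_nonneg _ (by positivity)
    have hlt : ((j : Int) - (k : Int)) % (s.length : Int) < (s.length : Int) :=
      Int.emod_lt_of_pos _ (by exact_mod_cast hL)
    rw [PySem.List.pyGetD_eq_getElem _ _ h0 (by simpa using hlt)]
    have hidx : (((j : Int) - (k : Int)) % (s.length : Int)).toNat
        = (j + (s.length - k)) % s.length := by
      by_cases hle : k ≤ j
      · have e1 : ((j : Int) - (k : Int)) % (s.length : Int) = ((j - k : Nat) : Int) := by
          rw [Int.emod_eq_of_lt (by omega) (by omega)]
          omega
        rw [e1]
        have : j + (s.length - k) = (j - k) + s.length := by omega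
        rw [this, Nat.add_mod_right, Nat.mod_eq_of_lt (by omega)]
        omega
      · have hlt2 : j < k := by omega
        have e1 : ((j : Int) - (k : Int)) % (s.length : Int)
            = ((j + (s.length - k) : Nat) : Int) := by
          have h2' := Int.add_mul_emod_self_left (a := (j : Int) - (k : Int))
            (b := (s.length : Int)) (c := 1)
          rw [mul_one] at h2'
          rw [← h2', Int.emod_eq_of_lt (by omega) (by omega)]
          omega
        rw [e1, Nat.mod_eq_of_lt (by omega)]
        omega
    simp only [hidx]

-- A's orbit list and B's rotation list have the same members
theorem mem_rotsA {s x : List Int} (hs : s ≠ []) :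
    x ∈ (PySem.List.pyRange 0 (s.length : Int) 1).map (fun r => translate_state s r) ↔
      s.IsRotated x := by
  have hL : 0 < s.length := List.length_pos_iff.2 hs
  rw [pv_pyRange_map]
  constructor
  · intro h
    rcases List.mem_map.1 h with ⟨k, hk, rfl⟩
    rw [List.mem_range] at hk
    rw [translate_eq_rotate s k hk]
    exact ⟨s.length - k, rfl⟩
  · rintro ⟨n, rfl⟩
    by_cases hm : n % s.length = 0
    · refine List.mem_map.2 ⟨0, List.mem_range.2 hL, ?_⟩
      rw [translate_eq_rotate s 0 hL, Nat.sub_zero, List.rotate_length,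
        ← List.rotate_mod, hm, List.rotate_zero]
    · have hmlt : n % s.length < s.length := Nat.mod_lt _ hL
      refine List.mem_map.2 ⟨s.length - n % s.length, List.mem_range.2 (by omega), ?_⟩
      rw [translate_eq_rotate s _ (by omega)]
      have : s.length - (s.length - n % s.length) = n % s.length := by omega
      rw [this, List.rotate_mod]

-- canonical representative facts
theorem pvCanon_nil : pvCanon ([] : List Int) = [] := rfl

theorem pvCanon_spec {s : List Int} (hs : s ≠ []) :
    pvCanon s ∈ pvRots s ∧ ∀ y ∈ pvRots s, pvCanon s ≤ y := by
  have hne := pvRots_ne_nil hs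
  obtain ⟨m, hm⟩ : ∃ m, PySem.List.min? (pvRots s) (fun x => x) = some m := by
    cases hmin : PySem.List.min? (pvRots s) (fun x => x) with
    | none => exact absurd ((PySem.List.min?_eq_none_iff _ _).1 hmin) hne
    | some m => exact ⟨m, rfl⟩
  have hc : pvCanon s = m := by
    unfold pvCanon
    rw [if_neg hne, hm]
    rfl
  rw [hc]
  have hm2 : (@PySem.List.min? (List Int) (List Int) LinearOrder.toPartialOrder.toPreorder.toLT LinearOrder.toDecidableLT
      (pvRots s) (fun x => x)) = some m := by
    rw [pv_dec_inst] at hm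
    exact hm
  exact ⟨PySem.List.min?_mem hm, fun y hy =>
    @PySem.List.min?_isMin (List Int) (List Int) List.instLinearOrder _ _ _ hm2 y hy⟩

theorem pvCanon_mem {s : List Int} (hs : s ≠ []) : s.IsRotated (pvCanon s) :=
  (mem_pvRots hs).1 (pvCanon_spec hs).1

theorem pvCanon_min {s : List Int} (hs : s ≠ []) :
    ∀ y ∈ pvRots s, pvCanon s ≤ y := (pvCanon_spec hs).2

theorem pvCanon_ne_nil {s : List Int} (hs : s ≠ []) : pvCanon s ≠ [] := by
  intro hc
  have := (pvCanon_mem hs).perm.length_eq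
  rw [hc] at this
  exact hs (List.length_eq_zero_iff.1 this)

theorem pvCanon_eq_of_isRotated {s x : List Int} (hs : s ≠ []) (h : s.IsRotated x) :
    pvCanon s = pvCanon x := by
  have hx : x ≠ [] := by
    intro hx
    rw [hx] at h
    have := h.perm.length_eq
    simp at this
    exact hs this
  have hmem_iff : ∀ y, y ∈ pvRots s ↔ y ∈ pvRots x := by
    intro y
    rw [mem_pvRots hs, mem_pvRots hx]
    exact ⟨fun hy => h.symm.trans hy, fun hy => h.trans hy⟩
  have h1 : pvCanon s ≤ pvCanon x :=
    pvCanon_min hs _ ((hmem_iff _).2 (pvCanon_spec hx).1)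
  have h2 : pvCanon x ≤ pvCanon s :=
    pvCanon_min hx _ ((hmem_iff _).1 (pvCanon_spec hs).1)
  exact le_antisymm h1 h2

theorem isRotated_of_pvCanon_eq {s x : List Int} (hs : s ≠ []) (hx : x ≠ [])
    (h : pvCanon s = pvCanon x) : s.IsRotated x := by
  have h1 := pvCanon_mem hs
  have h2 := pvCanon_mem hx
  rw [h] at h1
  exact h1.trans h2.symm

-- PySem.List.sorted with id key does not depend on which (propositionally equal) Decidable
-- instance is in scope, so sorting permuted nodup lists agrees
theorem pv_sorted_eq_of_perm (xs ys : List (List Int)) (hp : xs.Perm ys) :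
    PySem.List.sorted xs (fun x => x) false = PySem.List.sorted ys (fun x => x) false := by
  have hinst : (fun (a b : List Int) => a.decidableLT b)
      = (LinearOrder.toDecidableLT (α := List Int)) := by
    funext a b
    exact Subsingleton.elim _ _
  rw [hinst]
  exact PySem.List.sorted_eq_sorted_of_perm xs ys (fun x => x) (fun a b hab => hab) hp

-- the group A appends for s equals B's group at canon s
theorem groupA_eq (s : List Int) :
    PySem.List.sorted
      (PySem.Set.ofList
        ((PySem.List.pyRange 0 (s.length : Int) 1).map (fun r => translate_state s r)))
      (fun x => x) false = pvGroup (pvCanon s) := by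
  by_cases hs : s = []
  · subst hs
    rfl
  · unfold pvGroup
    refine pv_sorted_eq_of_perm _ _ ?_
    refine (List.perm_ext_iff_of_nodup (PySem.Set.nodup_ofList _) (PySem.Set.nodup_ofList _)).2 ?_
    intro y
    rw [PySem.Set.mem_ofList, PySem.Set.mem_ofList, mem_rotsA hs,
      mem_pvRots (pvCanon_ne_nil hs)]
    exact ⟨fun hy => (pvCanon_mem hs).symm.trans hy,
      fun hy => (pvCanon_mem hs).trans hy⟩

-- the main loop invariant
theorem pv_main (rest : List (List Int)) :
    ∀ (seen : PySem.Set (List Int)) (orb : List (List (List Int)))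
      (d : PySem.Dict (List Int) Unit),
      rest.count ([] : List Int) + (if (d.get? []).isSome then 1 else 0) ≤ 1 →
      (∀ x : List Int, x ∈ seen ↔ x ≠ [] ∧ (d.get? (pvCanon x)).isSome) →
      orb = (d.keys).map pvGroup →
      (rest.foldl pvStepA (seen, orb)).2 = ((rest.foldl pvStepB d).keys).map pvGroup := by
  induction rest with
  | nil =>
    intro seen orb d _ _ horb
    simpa using horb
  | cons s rest ih =>
    intro seen orb d hcnt hmem horb
    simp only [List.foldl_cons]
    by_cases hnil : s = []
    · subst hnil
      have hnotin : ([] : List Int) ∉ seen := fun h => ((hmem []).1 h).1 rfl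
      have hcc : ((([] : List Int) :: rest).count ([] : List Int))
          = rest.count ([] : List Int) + 1 := by
        simp
      have hd : (d.get? ([] : List Int)).isSome = false := by
        cases h' : (d.get? ([] : List Int)).isSome
        · rfl
        · rw [hcc, h'] at hcnt
          simp at hcnt
      have hcont : PySem.Dict.contains d ([] : List Int) = false := by
        rw [PySem.Dict.contains_eq_isSome_get?, hd]
      have hstepA : pvStepA (seen, orb) [] = (seen, orb ++ [[]]) := by
        unfold pvStepA
        rw [if_neg hnotin]
        rfl
      have hstepB : pvStepB d [] = d.insert [] () := by
        unfold pvStepB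
        rw [pvCanon_nil, hcont]
        simp
      rw [hstepA, hstepB]
      apply ih
      · rw [hcc, hd] at hcnt
        simp only [if_neg (by simp : ¬(false = true))] at hcnt
        have h0 : rest.count ([] : List Int) = 0 := by omega
        simp [PySem.Dict.get?_insert_self, h0]
      · intro x
        by_cases hxnil : x = []
        · subst hxnil
          simp [hnotin]
        · rw [hmem x, PySem.Dict.get?_insert_of_ne d () (pvCanon_ne_nil hxnil)]
      · rw [horb, PySem.Dict.keys_insert_of_not_contains d () hcont, List.map_append]
        rfl
    · have hcc : ((s :: rest).count ([] : List Int)) = rest.count ([] : List Int) := by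
        simp [hnil]
      by_cases hseen : s ∈ seen
      · have hds : (d.get? (pvCanon s)).isSome = true := ((hmem s).1 hseen).2
        have hcont : PySem.Dict.contains d (pvCanon s) = true := by
          rw [PySem.Dict.contains_eq_isSome_get?, hds]
        have hstepA : pvStepA (seen, orb) s = (seen, orb) := by
          unfold pvStepA
          rw [if_pos hseen]
        have hstepB : pvStepB d s = d := by
          unfold pvStepB
          rw [hcont]
          simp
        rw [hstepA, hstepB]
        rw [hcc] at hcnt
        exact ih seen orb d hcnt hmem horb
      · have hds : (d.get? (pvCanon s)).isSome = false := by
          cases h' : (d.get? (pvCanon s)).isSome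
          · rfl
          · exact absurd ((hmem s).2 ⟨hnil, h'⟩) hseen
        have hcont : PySem.Dict.contains d (pvCanon s) = false := by
          rw [PySem.Dict.contains_eq_isSome_get?, hds]
        have hstepA : pvStepA (seen, orb) s =
            (PySem.Set.update seen
              (PySem.Set.ofList
                ((PySem.List.pyRange 0 (s.length : Int) 1).map (fun r => translate_state s r))),
              orb ++ [PySem.List.sorted
                (PySem.Set.ofList
                  ((PySem.List.pyRange 0 (s.length : Int) 1).map (fun r => translate_state s r)))
                (fun x => x) false]) := by
          unfold pvStepA
          rw [if_neg hseen]
        have hstepB : pvStepB d s = d.insert (pvCanon s) () := by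
          unfold pvStepB
          rw [hcont]
          simp
        rw [hstepA, hstepB]
        apply ih
        · rw [PySem.Dict.get?_insert_of_ne d () (Ne.symm (pvCanon_ne_nil hnil))]
          rw [hcc] at hcnt
          exact hcnt
        · intro x
          rw [PySem.Set.mem_update seen _ x]
          constructor
          · rintro (hx | hx)
            · obtain ⟨hxe, hxs⟩ := (hmem x).1 hx
              refine ⟨hxe, ?_⟩
              by_cases he : pvCanon x = pvCanon s
              · rw [he]
                simp only [PySem.Dict.get?_insert_self]
                rfl
              · rw [PySem.Dict.get?_insert_of_ne d () he]
                exact hxs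
            · have hrot : s.IsRotated x := (mem_rotsA hnil).1 ((PySem.Set.mem_ofList _ _).1 hx)
              have hxe : x ≠ [] := by
                intro h
                rw [h] at hrot
                have := hrot.perm.length_eq
                simp at this
                exact hnil this
              refine ⟨hxe, ?_⟩
              rw [← pvCanon_eq_of_isRotated hnil hrot]
              simp only [PySem.Dict.get?_insert_self]
              rfl
          · rintro ⟨hxe, hxs⟩
            by_cases he : pvCanon x = pvCanon s
            · right
              exact (PySem.Set.mem_ofList _ _).2
                ((mem_rotsA hnil).2 (isRotated_of_pvCanon_eq hnil hxe he.symm))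
            · left
              rw [PySem.Dict.get?_insert_of_ne d () he] at hxs
              exact (hmem x).2 ⟨hxe, hxs⟩
        · rw [horb, PySem.Dict.keys_insert_of_not_contains d () hcont, List.map_append]
          simp only [List.map_cons, List.map_nil]
          rw [← groupA_eq s]

-- tightness: inside D_ the outputs always differ (A's has one [] per empty state, B's at most one)
theorem pvGroup_ne_nil {c : List Int} (h : c ≠ []) : pvGroup c ≠ [] := by
  have hc : c ∈ pvRots c := (mem_pvRots h).2 (List.IsRotated.refl c)
  have : c ∈ pvGroup c := by
    unfold pvGroup
    rw [PySem.List.mem_sorted]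
    exact (PySem.Set.mem_ofList _ _).2 hc
  exact List.ne_nil_of_mem this

theorem pv_countA (rest : List (List Int)) :
    ∀ (seen : PySem.Set (List Int)) (orb : List (List (List Int))),
      ([] : List Int) ∉ seen →
      (((rest.foldl pvStepA (seen, orb)).2).count ([] : List (List Int)))
        = orb.count ([] : List (List Int)) + rest.count ([] : List Int) := by
  induction rest with
  | nil =>
    intro seen orb _
    simp
  | cons s rest ih =>
    intro seen orb hns
    simp only [List.foldl_cons]
    by_cases hnil : s = []
    · subst hnil
      have hstepA : pvStepA (seen, orb) [] = (seen, orb ++ [[]]) := by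
        unfold pvStepA
        rw [if_neg hns]
        rfl
      rw [hstepA, ih seen _ hns, List.count_append]
      simp
      omega
    · by_cases hseen : s ∈ seen
      · have hstepA : pvStepA (seen, orb) s = (seen, orb) := by
          unfold pvStepA
          rw [if_pos hseen]
        rw [hstepA, ih seen _ hns]
        simp [hnil]
      · have hstepA : pvStepA (seen, orb) s =
            (PySem.Set.update seen
              (PySem.Set.ofList
                ((PySem.List.pyRange 0 (s.length : Int) 1).map (fun r => translate_state s r))),
              orb ++ [PySem.List.sorted
                (PySem.Set.ofList
                  ((PySem.List.pyRange 0 (s.length : Int) 1).map (fun r => translate_state s r)))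
                (fun x => x) false]) := by
          unfold pvStepA
          rw [if_neg hseen]
        have hg : PySem.List.sorted
            (PySem.Set.ofList
              ((PySem.List.pyRange 0 (s.length : Int) 1).map (fun r => translate_state s r)))
            (fun x => x) false = pvGroup (pvCanon s) := groupA_eq s
        have hns' : ([] : List Int) ∉ PySem.Set.update seen
            (PySem.Set.ofList
              ((PySem.List.pyRange 0 (s.length : Int) 1).map (fun r => translate_state s r))) := by
          rw [PySem.Set.mem_update]
          rintro (h | h)
          · exact hns h
          · have hrot : s.IsRotated [] := (mem_rotsA hnil).1 ((PySem.Set.mem_ofList _ _).1 h)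
            have := hrot.perm.length_eq
            simp at this
            exact hnil this
        rw [hstepA, ih _ _ hns', List.count_append, hg]
        have hgne : pvGroup (pvCanon s) ≠ [] := pvGroup_ne_nil (pvCanon_ne_nil hnil)
        simp [hgne, hnil]

theorem pv_nodupB (rest : List (List Int)) :
    ∀ d : PySem.Dict (List Int) Unit, d.keys.Nodup → (rest.foldl pvStepB d).keys.Nodup := by
  induction rest with
  | nil =>
    intro d hd
    simpa using hd
  | cons s rest ih =>
    intro d hd
    simp only [List.foldl_cons]
    by_cases hc : PySem.Dict.contains d (pvCanon s) = true
    · have : pvStepB d s = d := by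
        unfold pvStepB
        rw [hc]
        simp
      rw [this]
      exact ih d hd
    · have hc' : PySem.Dict.contains d (pvCanon s) = false := by
        cases h' : PySem.Dict.contains d (pvCanon s)
        · rfl
        · exact absurd h' hc
      have : pvStepB d s = d.insert (pvCanon s) () := by
        unfold pvStepB
        rw [hc']
        simp
      rw [this]
      refine ih _ ?_
      rw [PySem.Dict.keys_insert_of_not_contains d () hc']
      have hnm : pvCanon s ∉ d.keys := by
        intro hm
        rw [(PySem.Dict.contains_iff_mem_keys _ _).2 hm] at hc'
        exact (by simp at hc' : False)
      simp [List.nodup_append, hd]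
      intro a ha hab
      exact hnm (hab ▸ ha)

theorem pv_countB (l : List (List Int)) :
    (l.map pvGroup).count ([] : List (List Int)) = l.count ([] : List Int) := by
  induction l with
  | nil => rfl
  | cons c l ih =>
    simp only [List.map_cons, List.count_cons, ih]
    by_cases hc : c = []
    · subst hc
      have h0 : pvGroup ([] : List Int) = [] := rfl
      simp [h0]
    · simp [hc, pvGroup_ne_nil hc]

-- ===== VERDICT (by name: the statement is the Claim_ definition above) =====
theorem get_orbits_spec : Claim_unchanged_get_orbits := by
  intro states _ hnd
  unfold get_orbits get_orbits_alt
  refine pv_main states PySem.Set.empty [] PySem.Dict.empty ?_ ?_ ?_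
  · unfold D_get_orbits at hnd
    simp only [PySem.Dict.get?_empty, Option.isSome_none, if_neg (by simp : ¬(false = true))]
    omega
  · intro x
    simp [PySem.Set.empty, PySem.Dict.get?_empty]
  · simp [PySem.Dict.keys_empty]

theorem get_orbits_changed : Claim_changed_get_orbits := by
  unfold Claim_changed_get_orbits; decide

theorem get_orbits_tight : Claim_exact_get_orbits := by
  intro states _ hD heq
  unfold D_get_orbits at hD
  have hA : (get_orbits states).count ([] : List (List Int)) = states.count ([] : List Int) := by
    unfold get_orbits
    rw [pv_countA states PySem.Set.empty [] (by simp [PySem.Set.empty])]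
    simp
  have hnd : (states.foldl pvStepB PySem.Dict.empty).keys.Nodup :=
    pv_nodupB states PySem.Dict.empty (by simp [PySem.Dict.keys_empty])
  have hB : (get_orbits_alt states).count ([] : List (List Int)) ≤ 1 := by
    unfold get_orbits_alt
    rw [pv_countB]
    exact List.nodup_iff_count_le_one.1 hnd _
  rw [heq] at hA
  omega
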